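-- pv_equiv track=rewrite | github.com/EmilioGalimberti/finalAED | practico/PARCIAL 3/ACT_PRACTICAS/2/functions.py | may_count
-- ===== SOURCE A (Python) =====
-- def binary_search(v, x):
--     izq, der = 0, len(v)-1
--     # Con un ciclo while colocamos la condición de corte.-
--     while izq <= der:
--         #Indice central
--         c = (izq + der)//2
--         if v[c] == x:
--             return c # c: indice del elemento central q coincide con el elem. buscado.
--         if x < v[c]:
--             der = c - 1
--         else:
--             izq = c + 1
--     # Elemento buscado no se encuentra en el arreglo.
--     return -1
--
-- def may_count(v,min): #usamos busqueda binaria para comenzar a contar apartir de ese numero, ya que anteriormente los ordenamos de menor a mayor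
--     pos = binary_search(v,min)
--     if pos == -1:
--         pos = 0
--     n = len(v)
--     c = 0
--     for i in range(pos,n):
--         if v[i] > min:
--             c += 1
--     return c
-- ===== SOURCE B (Python) =====
-- def may_count(v, min):
--     # upper-bound binary search: lo ends at the number of elements <= min
--     lo, hi = 0, len(v)
--     while lo < hi:
--         mid = (lo + hi) // 2
--         if v[mid] <= min:
--             lo = mid + 1
--         else:
--             hi = mid
--     return len(v) - lo
-- ===== Notes on version B (the rewrite author's own statement) =====
-- stated objective: faster
-- what changed: A does a membership binary search followed by a linear counting loop over the tail; B replaces both with a single upper-bound binary search (first index with v[i] > min) and returns len(v) minus that index, removing the linear pass.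
-- outside the precondition, e.g. on may_count([-1, -4], -2): A returns 1, B returns 0
import Mathlib
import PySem

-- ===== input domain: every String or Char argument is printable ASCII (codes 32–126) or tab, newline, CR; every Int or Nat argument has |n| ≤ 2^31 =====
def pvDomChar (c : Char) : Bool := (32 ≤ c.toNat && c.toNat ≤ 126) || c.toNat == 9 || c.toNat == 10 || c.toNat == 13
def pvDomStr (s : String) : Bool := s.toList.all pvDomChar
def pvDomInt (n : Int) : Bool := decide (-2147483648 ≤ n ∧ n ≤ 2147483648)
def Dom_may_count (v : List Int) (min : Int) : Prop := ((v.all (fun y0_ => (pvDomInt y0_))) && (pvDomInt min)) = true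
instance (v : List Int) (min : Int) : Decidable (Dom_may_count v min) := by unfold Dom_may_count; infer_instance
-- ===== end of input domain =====

-- B replaces A's membership binary search + linear counting loop by a single
-- upper-bound binary search; equal on sorted input, the function's documented domain.

-- ===== PORT A =====
-- while-loop of binary_search; v[c] is always in range on states reachable from
-- the initial call (0 ≤ izq, der ≤ len-1), where '.getD 0' is exact
def binary_search_loop (v : List Int) (x izq der : Int) : Int :=
  if _h : izq ≤ der then
    let c := PySem.Int.floordiv (izq + der) 2
    let vc := (PySem.List.pyGet? v c).getD 0
    if vc = x then c
    else if x < vc then binary_search_loop v x izq (c - 1)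
    else binary_search_loop v x (c + 1) der
  else -1
termination_by (der + 1 - izq).toNat
decreasing_by
  all_goals
    have := PySem.Int.floordiv_two_mid_bounds (show izq ≤ der from ‹_›)
    omega

def binary_search (v : List Int) (x : Int) : Int :=
  binary_search_loop v x 0 ((v.length : Int) - 1)

def may_count (v : List Int) (min : Int) : Int :=
  let pos := binary_search v min
  let pos := if pos = -1 then 0 else pos
  let n : Int := (v.length : Int)
  (PySem.List.pyRange pos n 1).foldl
    (fun c i => if min < (PySem.List.pyGet? v i).getD 0 then c + 1 else c) 0

-- ===== PORT B =====
-- while-loop of B; v[mid] is always in range when lo < hi ≤ len, where '.getD 0' is exact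
def bis_loop (v : List Int) (mn : Int) (lo hi : Nat) : Nat :=
  if lo < hi then
    let mid := (lo + hi) / 2
    if (PySem.List.pyGet? v (mid : Int)).getD 0 ≤ mn then bis_loop v mn (mid + 1) hi
    else bis_loop v mn lo mid
  else lo
termination_by hi - lo
decreasing_by all_goals omega

def may_count_alt (v : List Int) (min : Int) : Int :=
  (v.length : Int) - (bis_loop v min 0 v.length : Int)

-- ===== PRECONDITION & SPEC =====
-- Pre_ restricts to nondecreasing lists, the function's documented domain
-- ("anteriormente los ordenamos de menor a mayor"): on unsorted input A's value is an
-- accident of where its binary search happens to land, and B does not reproduce it.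
def Pre_may_count (v : List Int) (min : Int) : Prop := List.Pairwise (· ≤ ·) v
instance (v : List Int) (min : Int) : Decidable (Pre_may_count v min) := by
  unfold Pre_may_count; infer_instance

def pvWitness_may_count : List Int × Int := ([-3, 1, 1, 4, 7], 1)

def Spec_may_count (v : List Int) (min : Int) (out : Int) : Prop := out = may_count_alt v min
instance (v : List Int) (min : Int) (out : Int) : Decidable (Spec_may_count v min out) := by
  unfold Spec_may_count; infer_instance

-- ===== CLAIM (what is proved, stated in full; the proofs are below) =====
def Claim_equal_may_count : Prop :=
  ∀ (v : List Int) (min : Int), Dom_may_count v min → Pre_may_count v min →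
    Spec_may_count v min (may_count v min)

-- ===== LEMMAS AND PROOFS =====

theorem getIdx_nat (v : List Int) (n : Nat) :
    (PySem.List.pyGet? v ((n : Nat) : Int)).getD 0 = v.getD n 0 := by
  simp [List.getD_eq_getElem?_getD]

theorem getIdx_int (v : List Int) (c : Int) (h0 : 0 ≤ c) :
    (PySem.List.pyGet? v c).getD 0 = v.getD c.toNat 0 := by
  rw [show c = ((c.toNat : Nat) : Int) by omega, PySem.List.pyGet?_natCast,
    List.getD_eq_getElem?_getD, Int.toNat_natCast]

theorem sorted_getD_mono (v : List Int) (hs : List.Pairwise (· ≤ ·) v) (i j : Nat)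
    (hij : i ≤ j) (hj : j < v.length) : v.getD i 0 ≤ v.getD j 0 := by
  rcases Nat.lt_or_eq_of_le hij with h | h
  · rw [List.getD_eq_getElem _ _ (by omega), List.getD_eq_getElem _ _ hj]
    exact List.pairwise_iff_getElem.mp hs i j (by omega) hj h
  · subst h; exact le_refl _

-- countP of a list split at index r: everything before fails p, everything from r on satisfies p
theorem countP_eq_of_split (v : List Int) (p : Int → Bool) (r : Nat) (hr : r ≤ v.length)
    (h1 : ∀ i, i < r → p (v.getD i 0) = false)
    (h2 : ∀ i, r ≤ i → i < v.length → p (v.getD i 0) = true) :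
    v.countP p = v.length - r := by
  conv_lhs => rw [← List.take_append_drop r v]
  rw [List.countP_append]
  have ht : (v.take r).countP p = 0 := by
    rw [List.countP_eq_zero]
    intro a ha
    obtain ⟨i, hi, hieq⟩ := List.mem_iff_getElem.mp ha
    have hlt : i < r := by
      have := hi; simp [List.length_take] at this; omega
    have hiv : i < v.length := by omega
    rw [List.getElem_take] at hieq
    have := h1 i hlt
    rw [List.getD_eq_getElem _ _ hiv, hieq] at this
    simp [this]
  have hd : (v.drop r).countP p = (v.drop r).length := by
    rw [List.countP_eq_length]
    intro a ha
    obtain ⟨i, hi, hieq⟩ := List.mem_iff_getElem.mp ha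
    have hlen : (v.drop r).length = v.length - r := List.length_drop ..
    have hiv : r + i < v.length := by omega
    rw [List.getElem_drop] at hieq
    have := h2 (r + i) (by omega) hiv
    rw [List.getD_eq_getElem _ _ hiv, hieq] at this
    exact this
  rw [ht, hd, List.length_drop]
  omega

-- ===== B side =====
theorem bis_loop_spec (v : List Int) (mn : Int) (hs : List.Pairwise (· ≤ ·) v) :
    ∀ (k lo hi : Nat), hi - lo ≤ k → lo ≤ hi → hi ≤ v.length →
    (∀ i, i < lo → v.getD i 0 ≤ mn) →
    (∀ i, hi ≤ i → i < v.length → mn < v.getD i 0) →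
    bis_loop v mn lo hi ≤ v.length ∧
    (∀ i, i < bis_loop v mn lo hi → v.getD i 0 ≤ mn) ∧
    (∀ i, bis_loop v mn lo hi ≤ i → i < v.length → mn < v.getD i 0) := by
  intro k
  induction k with
  | zero =>
    intro lo hi hk hlh hlen h1 h2
    have he : hi = lo := by omega
    rw [bis_loop, if_neg (by omega)]
    exact ⟨by omega, h1, by intro i hi' hiv; exact h2 i (by omega) hiv⟩
  | succ k ih =>
    intro lo hi hk hlh hlen h1 h2
    rw [bis_loop]
    by_cases h : lo < hi
    · rw [if_pos h]
      simp only [getIdx_nat]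
      have hmb : lo ≤ (lo + hi) / 2 ∧ (lo + hi) / 2 < hi := by omega
      by_cases hv : v.getD ((lo + hi) / 2) 0 ≤ mn
      · rw [if_pos hv]
        refine ih ((lo + hi) / 2 + 1) hi (by omega) (by omega) hlen ?_ h2
        intro i hi'
        exact le_trans (sorted_getD_mono v hs i ((lo + hi) / 2) (by omega) (by omega)) hv
      · rw [if_neg hv]
        refine ih lo ((lo + hi) / 2) (by omega) (by omega) (by omega) h1 ?_
        intro i hi' hiv
        exact lt_of_lt_of_le (lt_of_not_ge hv)
          (sorted_getD_mono v hs ((lo + hi) / 2) i hi' hiv)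
    · rw [if_neg h]
      have he : hi = lo := by omega
      exact ⟨by omega, h1, by intro i hi' hiv; exact h2 i (by omega) hiv⟩

theorem may_count_alt_eq_countP (v : List Int) (mn : Int) (hs : List.Pairwise (· ≤ ·) v) :
    may_count_alt v mn = (v.countP (fun a => mn < a) : Int) := by
  obtain ⟨hr, h1, h2⟩ := bis_loop_spec v mn hs v.length 0 v.length (by omega) (by omega)
    (le_refl _) (by intro i hi; omega) (by intro i hi hiv; omega)
  have hc : v.countP (fun a => mn < a) = v.length - bis_loop v mn 0 v.length := by
    refine countP_eq_of_split v _ _ hr ?_ ?_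
    · intro i hi; simpa using h1 i hi
    · intro i hi hiv; simpa using h2 i hi hiv
  unfold may_count_alt
  rw [hc]
  omega

-- ===== A side =====
theorem bsearch_cases (v : List Int) (x : Int) :
    ∀ (k : Nat) (izq der : Int), (der + 1 - izq).toNat ≤ k → 0 ≤ izq → der < (v.length : Int) →
    binary_search_loop v x izq der = -1 ∨
    (∃ p : Nat, p < v.length ∧ binary_search_loop v x izq der = (p : Int) ∧ v.getD p 0 = x) := by
  intro k
  induction k with
  | zero =>
    intro izq der hk h0 hd
    rw [binary_search_loop, dif_neg (by omega)]
    exact Or.inl rfl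
  | succ k ih =>
    intro izq der hk h0 hd
    rw [binary_search_loop]
    by_cases h : izq ≤ der
    · rw [dif_pos h]
      have hcb := PySem.Int.floordiv_two_mid_bounds h
      set c := PySem.Int.floordiv (izq + der) 2 with hc
      have hc0 : 0 ≤ c := by omega
      have hcl : c < (v.length : Int) := by omega
      simp only [getIdx_int v c hc0]
      by_cases he : v.getD c.toNat 0 = x
      · rw [if_pos he]
        exact Or.inr ⟨c.toNat, by omega, by simp [Int.toNat_of_nonneg hc0], he⟩
      · rw [if_neg he]
        by_cases hlt : x < v.getD c.toNat 0
        · rw [if_pos hlt]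
          exact ih izq (c - 1) (by omega) h0 (by omega)
        · rw [if_neg hlt]
          exact ih (c + 1) der (by omega) (by omega) hd
    · rw [dif_neg h]
      exact Or.inl rfl

theorem count_loop (v : List Int) (mn : Int) :
    ∀ (k : Nat) (p acc : Int), ((v.length : Int) - p).toNat ≤ k → 0 ≤ p →
    (PySem.List.pyRange p (v.length : Int) 1).foldl
      (fun c i => if mn < (PySem.List.pyGet? v i).getD 0 then c + 1 else c) acc
    = acc + ((v.drop p.toNat).countP (fun a => mn < a) : Int) := by
  intro k
  induction k with
  | zero =>
    intro p acc hk h0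
    have hge : (v.length : Int) ≤ p := by omega
    rw [PySem.List.pyRange_one_eq_nil hge]
    have : v.drop p.toNat = [] := List.drop_eq_nil_of_le (by omega)
    simp [this]
  | succ k ih =>
    intro p acc hk h0
    by_cases h : p < (v.length : Int)
    · rw [PySem.List.pyRange_one_cons h]
      simp only [List.foldl_cons]
      rw [getIdx_int v p h0]
      have hpl : p.toNat < v.length := by omega
      have hdrop : v.drop p.toNat = v[p.toNat] :: v.drop (p.toNat + 1) :=
        List.drop_eq_getElem_cons hpl
      have hgd : v.getD p.toNat 0 = v[p.toNat] := List.getD_eq_getElem _ _ hpl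
      have hnext : (p + 1).toNat = p.toNat + 1 := by omega
      rw [ih (p + 1) _ (by omega) (by omega), hnext, hdrop, List.countP_cons, hgd]
      by_cases hv : mn < v[p.toNat]
      · rw [if_pos hv]; simp [hv]; ring
      · rw [if_neg hv]; simp [hv]
    · have hge : (v.length : Int) ≤ p := by omega
      rw [PySem.List.pyRange_one_eq_nil hge]
      have : v.drop p.toNat = [] := List.drop_eq_nil_of_le (by omega)
      simp [this]

theorem may_count_eq_countP (v : List Int) (mn : Int) (hs : List.Pairwise (· ≤ ·) v) :
    may_count v mn = (v.countP (fun a => mn < a) : Int) := by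
  unfold may_count binary_search
  rcases bsearch_cases v mn ((v.length : Int) - 1 + 1 - 0).toNat 0 ((v.length : Int) - 1)
      (le_refl _) (le_refl _) (by omega) with hcase | ⟨p, hp, heq, hv⟩
  · rw [hcase]
    simp only [if_true]
    rw [count_loop v mn ((v.length : Int) - 0).toNat 0 0 (le_refl _) (le_refl _)]
    simp
  · rw [heq]
    have hne : ((p : Nat) : Int) ≠ -1 := by omega
    simp only [if_neg hne]
    rw [count_loop v mn ((v.length : Int) - p).toNat p 0 (le_refl _) (by omega)]
    have htoNat : ((p : Nat) : Int).toNat = p := by omega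
    rw [htoNat]
    -- countP over the whole list equals countP over the suffix: the prefix is ≤ mn
    have hsplit : v.countP (fun a => mn < a)
        = (v.take p).countP (fun a => mn < a) + (v.drop p).countP (fun a => mn < a) := by
      conv_lhs => rw [← List.take_append_drop p v]
      rw [List.countP_append]
    have htz : (v.take p).countP (fun a => mn < a) = 0 := by
      rw [List.countP_eq_zero]
      intro a ha
      obtain ⟨i, hi, hieq⟩ := List.mem_iff_getElem.mp ha
      have hlt : i < p := by
        have := hi; simp [List.length_take] at this; omega
      have hiv : i < v.length := by omega
      rw [List.getElem_take] at hieq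
      have hle : v.getD i 0 ≤ v.getD p 0 := sorted_getD_mono v hs i p (by omega) hp
      rw [List.getD_eq_getElem _ _ hiv, hieq, hv] at hle
      simp; omega
    rw [hsplit, htz]
    simp
  
-- ===== VERDICT (by name: the statement is the Claim_ definition above) =====
theorem may_count_spec : Claim_equal_may_count := by
  intro v mn _hd hpre
  unfold Spec_may_count
  rw [may_count_eq_countP v mn hpre, may_count_alt_eq_countP v mn hpre]
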